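-- pv_equiv track=rewrite | github.com/onesomeOrganization/Json-Builder | helper.py | get_content_length
-- ===== SOURCE A (Python) =====
-- content_length_dict = {'REFERENCE': 1, 'PARAGRAPH': 1, 'AUDIO': 2, 'IMAGE': 2, 'SMALL_IMAGE': 2, 'MORE_INFORMATION_EXPANDED': 1, 'MORE_INFORMATION': 1, 'SUB_TITLE': 1, 'REFERENCE': 1, 'PDF_DOWNLOAD': 2}
--
-- need_answer_option = ('BUTTON', 'ITEM(Single)', 'ITEM(Multiple)', 'ANSWER OPTION', 'SEVERAL ANSWER OPTIONS', 'SCALA')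
--
-- def get_content_length(structure):
--     length = 0
--     answer_option_length_is_considered = False
--     for entry in structure:
--       if entry in content_length_dict:
--         length+=content_length_dict[entry]
--       if entry in need_answer_option and not answer_option_length_is_considered:
--          length+=1
--          answer_option_length_is_considered = True
--     return length
-- ===== SOURCE B (Python) =====
-- content_length_dict = {'REFERENCE': 1, 'PARAGRAPH': 1, 'AUDIO': 2, 'IMAGE': 2, 'SMALL_IMAGE': 2, 'MORE_INFORMATION_EXPANDED': 1, 'MORE_INFORMATION': 1, 'SUB_TITLE': 1, 'REFERENCE': 1, 'PDF_DOWNLOAD': 2}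
--
-- need_answer_option = ('BUTTON', 'ITEM(Single)', 'ITEM(Multiple)', 'ANSWER OPTION', 'SEVERAL ANSWER OPTIONS', 'SCALA')
--
-- def get_content_length(structure):
--     # Build a histogram of the structure once, then weight it from the
--     # table's side: total = sum over table entries of weight * occurrences,
--     # plus 1 if the histogram holds any answer-option key.
--     counts = {}
--     for e in structure:
--         counts[e] = counts.get(e, 0) + 1
--     total = 0
--     for key, weight in content_length_dict.items():
--         total += weight * counts.get(key, 0)
--     if any(k in counts for k in need_answer_option):
--         total += 1
--     return total
-- ===== Notes on version B (the rewrite author's own statement) =====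
-- stated objective: alternative
-- what changed: B builds a histogram (dict of occurrence counts) of the structure once, then iterates the constant weight table computing sum(weight * count) and adds 1 if any answer-option key is present in the histogram, instead of A's single stateful pass over the structure with a running total and a considered-flag.
import Mathlib
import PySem

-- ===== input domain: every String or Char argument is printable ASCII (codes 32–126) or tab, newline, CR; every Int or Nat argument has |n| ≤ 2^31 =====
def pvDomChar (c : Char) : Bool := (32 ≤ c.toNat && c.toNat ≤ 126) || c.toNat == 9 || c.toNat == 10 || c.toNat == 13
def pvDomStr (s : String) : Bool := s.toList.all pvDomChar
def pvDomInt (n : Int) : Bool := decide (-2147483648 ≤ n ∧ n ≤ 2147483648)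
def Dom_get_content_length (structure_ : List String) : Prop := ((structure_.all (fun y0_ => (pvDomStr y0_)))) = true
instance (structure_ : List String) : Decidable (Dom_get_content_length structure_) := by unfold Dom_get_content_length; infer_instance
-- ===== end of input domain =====

-- B builds a histogram of the structure, then weights it from the constant table's side and adds 1 if any answer-option key is present (objective: alternative).
-- ===== PORT A =====
-- content_length_dict (duplicate 'REFERENCE' key in the Python literal overwrites with the same value)
def pvContentLenDict : PySem.Dict String Int :=
  PySem.Dict.ofList [("REFERENCE", 1), ("PARAGRAPH", 1), ("AUDIO", 2), ("IMAGE", 2),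
    ("SMALL_IMAGE", 2), ("MORE_INFORMATION_EXPANDED", 1), ("MORE_INFORMATION", 1),
    ("SUB_TITLE", 1), ("REFERENCE", 1), ("PDF_DOWNLOAD", 2)]

def pvNeedAnswerOption : List String :=
  ["BUTTON", "ITEM(Single)", "ITEM(Multiple)", "ANSWER OPTION", "SEVERAL ANSWER OPTIONS", "SCALA"]

def get_content_length (structure_ : List String) : Int :=
  (structure_.foldl (fun (st : Int × Bool) entry =>
    let length := st.1
    let flag := st.2
    let length := match pvContentLenDict.get? entry with
      | some v => length + v
      | none => length
    if pvNeedAnswerOption.contains entry && !flag then (length + 1, true)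
    else (length, flag)) (0, false)).1

-- ===== PORT B =====
def get_content_length_alt (structure_ : List String) : Int :=
  -- counts = {}: for e in structure: counts[e] = counts.get(e, 0) + 1
  let counts : PySem.Dict String Int :=
    structure_.foldl (fun d e => d.insert e (d.getD e 0 + 1)) PySem.Dict.empty
  -- total = 0; for key, weight in content_length_dict.items(): total += weight * counts.get(key, 0)
  let total : Int :=
    pvContentLenDict.items.foldl (fun acc kv => acc + kv.2 * counts.getD kv.1 0) 0
  -- if any(k in counts for k in need_answer_option): total += 1
  if pvNeedAnswerOption.any (fun k => counts.contains k) then total + 1 else total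

-- ===== PRECONDITION & SPEC =====
def Spec_get_content_length (structure_ : List String) (out : Int) : Prop := out = get_content_length_alt structure_
instance (structure_ : List String) (out : Int) : Decidable (Spec_get_content_length structure_ out) := by unfold Spec_get_content_length; infer_instance

-- ===== CLAIM (what is proved, stated in full; the proofs are below) =====
def Claim_equal_get_content_length : Prop := ∀ (structure_ : List String), Dom_get_content_length structure_ → Spec_get_content_length structure_ (get_content_length structure_)

-- ===== LEMMAS AND PROOFS =====
-- A's loop computes the lookup-sum plus the flag-guarded extra 1.
lemma pv_loop (l : List String) (len : Int) (flag : Bool) :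
    (l.foldl (fun (st : Int × Bool) entry =>
      let length := st.1
      let flag := st.2
      let length := match pvContentLenDict.get? entry with
        | some v => length + v
        | none => length
      if pvNeedAnswerOption.contains entry && !flag then (length + 1, true)
      else (length, flag)) (len, flag)).1
    = len + (l.map (fun e => pvContentLenDict.getD e 0)).sum
        + (if !flag && l.any (fun e => pvNeedAnswerOption.contains e) then 1 else 0) := by
  induction l generalizing len flag with
  | nil => simp
  | cons e t ih =>
    simp only [List.foldl_cons, List.map_cons, List.sum_cons, List.any_cons]
    by_cases hm : pvNeedAnswerOption.contains e = true <;> cases flag <;>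
      simp only [hm, Bool.not_true, Bool.not_false, Bool.and_true, Bool.and_false,
        Bool.true_and, Bool.false_and, Bool.true_or, Bool.false_or, if_true, if_false,
        Bool.false_eq_true] <;>
      (rw [ih]; rcases h : pvContentLenDict.get? e with _ | v <;>
        simp [PySem.Dict.getD, h] <;> ring)

-- B's histogram returns, for every key, its occurrence count in the list.
lemma pv_counts_getD (l : List String) (d : PySem.Dict String Int) (k : String) :
    (l.foldl (fun d e => d.insert e (d.getD e 0 + 1)) d).getD k 0
      = d.getD k 0 + (l.count k : Int) := by
  induction l generalizing d with
  | nil => simp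
  | cons e t ih =>
    simp only [List.foldl_cons, List.count_cons, ih, PySem.Dict.getD_insert]
    by_cases h : k = e
    · simp [h]; ring
    · simp [h, Ne.symm h]

-- B's histogram contains exactly the elements of the list.
lemma pv_counts_contains (l : List String) (d : PySem.Dict String Int) (k : String) :
    (l.foldl (fun d e => d.insert e (d.getD e 0 + 1)) d).contains k
      = (d.contains k || l.contains k) := by
  induction l generalizing d with
  | nil => simp
  | cons e t ih =>
    simp only [List.foldl_cons, ih, PySem.Dict.contains_insert, List.contains_cons]
    by_cases h : k = e <;> simp [h, Bool.or_assoc, Bool.or_comm, Bool.or_left_comm]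

-- the single δ-sum over the table at one key equals the dict lookup
lemma pv_delta (e : String) :
    (1:Int) * (if e = "REFERENCE" then 1 else 0)
    + 1 * (if e = "PARAGRAPH" then 1 else 0)
    + 2 * (if e = "AUDIO" then 1 else 0)
    + 2 * (if e = "IMAGE" then 1 else 0)
    + 2 * (if e = "SMALL_IMAGE" then 1 else 0)
    + 1 * (if e = "MORE_INFORMATION_EXPANDED" then 1 else 0)
    + 1 * (if e = "MORE_INFORMATION" then 1 else 0)
    + 1 * (if e = "SUB_TITLE" then 1 else 0)
    + 2 * (if e = "PDF_DOWNLOAD" then 1 else 0)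
    = pvContentLenDict.getD e 0 := by
  by_cases h1 : e = "REFERENCE"; · subst h1; decide
  by_cases h2 : e = "PARAGRAPH"; · subst h2; decide
  by_cases h3 : e = "AUDIO"; · subst h3; decide
  by_cases h4 : e = "IMAGE"; · subst h4; decide
  by_cases h5 : e = "SMALL_IMAGE"; · subst h5; decide
  by_cases h6 : e = "MORE_INFORMATION_EXPANDED"; · subst h6; decide
  by_cases h7 : e = "MORE_INFORMATION"; · subst h7; decide
  by_cases h8 : e = "SUB_TITLE"; · subst h8; decide
  by_cases h9 : e = "PDF_DOWNLOAD"; · subst h9; decide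
  have hk : pvContentLenDict.keys = ["REFERENCE","PARAGRAPH","AUDIO","IMAGE","SMALL_IMAGE",
      "MORE_INFORMATION_EXPANDED","MORE_INFORMATION","SUB_TITLE","PDF_DOWNLOAD"] := by decide
  have hc : pvContentLenDict.contains e = false := by
    rw [← Bool.not_eq_true, PySem.Dict.contains_iff_mem_keys, hk]
    simp [h1, h2, h3, h4, h5, h6, h7, h8, h9]
  rw [PySem.Dict.getD_of_not_contains _ _ hc]
  simp [h1, h2, h3, h4, h5, h6, h7, h8, h9]

-- weighting the histogram from the table's side equals summing lookups over the list
lemma pv_weight (l : List String) :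
    pvContentLenDict.items.foldl (fun acc kv => acc + kv.2 * (l.count kv.1 : Int)) 0
      = (l.map (fun e => pvContentLenDict.getD e 0)).sum := by
  have hitems : pvContentLenDict.items =
      [("REFERENCE", 1), ("PARAGRAPH", 1), ("AUDIO", 2), ("IMAGE", 2),
       ("SMALL_IMAGE", 2), ("MORE_INFORMATION_EXPANDED", 1), ("MORE_INFORMATION", 1),
       ("SUB_TITLE", 1), ("PDF_DOWNLOAD", 2)] := by decide
  rw [hitems]
  induction l with
  | nil => simp
  | cons e t ih =>
    simp only [List.foldl_cons, List.foldl_nil] at ih ⊢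
    simp only [List.count_cons, beq_iff_eq, List.map_cons, List.sum_cons]
    rw [← pv_delta e, ← ih]
    push_cast
    ring

-- membership of an option in the histogram-keys ↔ somewhere in the list
lemma pv_any_swap (l : List String) :
    pvNeedAnswerOption.any (fun k => l.contains k)
      = l.any (fun e => pvNeedAnswerOption.contains e) := by
  rw [Bool.eq_iff_iff]
  simp only [List.any_eq_true, List.contains_iff_mem]
  constructor
  · rintro ⟨k, hk, hl⟩; exact ⟨k, hl, hk⟩
  · rintro ⟨k, hl, hk⟩; exact ⟨k, hk, hl⟩

-- ===== VERDICT (by name: the statement is the Claim_ definition above) =====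
theorem get_content_length_spec : Claim_equal_get_content_length := by
  intro s _
  show get_content_length s = get_content_length_alt s
  unfold get_content_length get_content_length_alt
  rw [pv_loop]
  simp only [Bool.not_false, Bool.true_and, zero_add]
  have hD : ∀ k, (s.foldl (fun d e => d.insert e (d.getD e 0 + 1))
        (PySem.Dict.empty : PySem.Dict String Int)).getD k 0
      = (s.count k : Int) := fun k => by
    rw [pv_counts_getD]; simp
  have hC : ∀ k, (s.foldl (fun d e => d.insert e (d.getD e 0 + 1))
        (PySem.Dict.empty : PySem.Dict String Int)).contains k
      = s.contains k := fun k => by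
    rw [pv_counts_contains]; simp
  simp only [hD, hC, pv_weight, pv_any_swap]
  split_ifs <;> ring
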